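-- pv_equiv track=rewrite | github.com/ronddans76/coconut | coconut/util.py | logical_lines
-- ===== SOURCE A (Python) =====
-- def logical_lines(text, keep_newlines=False):
--     """Iterate over the logical code lines in text."""
--     prev_content = None
--     for line in text.splitlines(True):
--         real_line = True
--         if line.endswith("\r\n"):
--             if not keep_newlines:
--                 line = line[:-2]
--         elif line.endswith(("\n", "\r")):
--             if not keep_newlines:
--                 line = line[:-1]
--         else:
--             if prev_content is None:
--                 prev_content = ""
--             prev_content += line
--             real_line = False
--         if real_line:
--             if prev_content is not None:
--                 line = prev_content + line
--                 prev_content = None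
--             yield line
--     if prev_content is not None:
--         yield prev_content
-- ===== SOURCE B (Python) =====
-- def logical_lines(text, keep_newlines=False):
--     """Iterate over the logical code lines in text."""
--     i, n = 0, len(text)
--     while i < n:
--         j = i
--         while j < n and text[j] != "\n" and text[j] != "\r":
--             j += 1
--         if j == n:
--             yield text[i:]
--             return
--         k = j + 2 if text[j] == "\r" and j + 1 < n and text[j + 1] == "\n" else j + 1
--         yield text[i:k] if keep_newlines else text[i:j]
--         i = k
-- ===== Notes on version B (the rewrite author's own statement) =====
-- stated objective: alternative
-- what changed: Replaces A's splitlines(True) pass plus a prev_content/real_line accumulator state machine by a single index scan that finds each line terminator (\r\n, \r or \n) directly and yields the line immediately.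
import Mathlib
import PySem

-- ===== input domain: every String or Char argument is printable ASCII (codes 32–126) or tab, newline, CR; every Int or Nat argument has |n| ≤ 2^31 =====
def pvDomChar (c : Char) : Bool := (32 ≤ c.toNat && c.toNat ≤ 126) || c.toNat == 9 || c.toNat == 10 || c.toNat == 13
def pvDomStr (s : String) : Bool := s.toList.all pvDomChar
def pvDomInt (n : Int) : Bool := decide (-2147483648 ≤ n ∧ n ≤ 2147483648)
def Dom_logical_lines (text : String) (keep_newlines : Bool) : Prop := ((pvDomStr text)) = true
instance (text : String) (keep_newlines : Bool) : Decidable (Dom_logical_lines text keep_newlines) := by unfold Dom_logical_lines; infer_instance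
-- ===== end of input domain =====

-- B replaces A's splitlines+accumulator state machine by a direct index scan that emits each
-- line as soon as its terminator is found (objective: alternative decomposition, same cost).


-- ===== PORT A =====
-- str.splitlines(True) ported by hand (PySem.Str.splitlines has no keepends variant); exact for
-- texts whose characters lie in Dom_logical_lines, where the only line boundaries are "\r\n", "\r", "\n".
def slkGo : List Char → List Char → List (List Char)
  | [], cur => if cur.isEmpty then [] else [cur]
  | c :: rest, cur =>
    if c = '\r' then
      match rest with
      | [] => [cur ++ ['\r']]
      | r0 :: r =>
        if r0 = '\n' then (cur ++ ['\r', '\n']) :: slkGo r []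
        else (cur ++ ['\r']) :: slkGo (r0 :: r) []
    else if c = '\n' then (cur ++ ['\n']) :: slkGo rest []
    else slkGo rest (cur ++ [c])

-- the body of A's for loop, on the state (prev_content, emitted lines)
def aStep (keep_newlines : Bool) (st : Option (List Char) × List String) (line0 : List Char) :
    Option (List Char) × List String :=
  let (prev, acc) := st
  if PySem.Chars.endswith line0 ['\r', '\n'] then
    let line := if keep_newlines then line0 else PySem.List.slice line0 none (some (-2))
    match prev with
    | some p => (none, acc ++ [String.ofList (p ++ line)])
    | none => (none, acc ++ [String.ofList line])
  else if PySem.Chars.endswith line0 ['\n'] || PySem.Chars.endswith line0 ['\r'] then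
    let line := if keep_newlines then line0 else PySem.List.slice line0 none (some (-1))
    match prev with
    | some p => (none, acc ++ [String.ofList (p ++ line)])
    | none => (none, acc ++ [String.ofList line])
  else
    (some (prev.getD [] ++ line0), acc)

def logical_lines (text : String) (keep_newlines : Bool) : List String :=
  let st := List.foldl (aStep keep_newlines) (none, []) (slkGo text.toList [])
  match st.1 with
  | some p => st.2 ++ [String.ofList p]
  | none => st.2

-- ===== PORT B =====
-- B's inner while loop: split the remaining text at the first '\n'/'\r' (content before it, rest from it)
def lineScan : List Char → List Char × List Char
  | [] => ([], [])
  | c :: rest =>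
    if c = '\n' ∨ c = '\r' then ([], c :: rest)
    else
      let (a, b) := lineScan rest
      (c :: a, b)

theorem lineScan_append : ∀ cs : List Char, (lineScan cs).1 ++ (lineScan cs).2 = cs := by
  intro cs
  induction cs with
  | nil => simp [lineScan]
  | cons c rest ih =>
    by_cases h : c = '\n' ∨ c = '\r' <;> simp [lineScan, h] <;> exact ih

-- B's outer while loop over the index i becomes structural recursion over the remaining suffix
def altGo (keep_newlines : Bool) (cs : List Char) : List String :=
  match h : lineScan cs with
  | (content, []) => if cs.isEmpty then [] else [String.ofList content]
  | (content, b :: r) =>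
    if b = '\r' ∧ r.head? = some '\n' then
      (if keep_newlines then String.ofList (content ++ ['\r', '\n']) else String.ofList content)
        :: altGo keep_newlines r.tail
    else
      (if keep_newlines then String.ofList (content ++ [b]) else String.ofList content)
        :: altGo keep_newlines r
termination_by cs.length
decreasing_by
  all_goals
    have h2 := lineScan_append cs
    rw [h] at h2
    have h3 := congrArg List.length h2
    simp at h3
    simp
    omega

def logical_lines_alt (text : String) (keep_newlines : Bool) : List String :=
  altGo keep_newlines text.toList

-- ===== PRECONDITION & SPEC =====
def Spec_logical_lines (text : String) (keep_newlines : Bool) (out : List String) : Prop := out = logical_lines_alt text keep_newlines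
instance (text : String) (keep_newlines : Bool) (out : List String) : Decidable (Spec_logical_lines text keep_newlines out) := by unfold Spec_logical_lines; infer_instance

-- ===== CLAIM (what is proved, stated in full; the proofs are below) =====
def Claim_equal_logical_lines : Prop := ∀ (text : String) (keep_newlines : Bool), Dom_logical_lines text keep_newlines → Spec_logical_lines text keep_newlines (logical_lines text keep_newlines)

-- ===== LEMMAS AND PROOFS =====

-- flush the pending prev_content, as A does after the loop
def pvFinish (st : Option (List Char) × List String) : List String :=
  match st.1 with
  | some p => st.2 ++ [String.ofList p]
  | none => st.2

theorem lineScan_no_break : ∀ cs : List Char, ∀ c ∈ (lineScan cs).1, ¬(c = '\n' ∨ c = '\r') := by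
  intro cs
  induction cs with
  | nil => simp [lineScan]
  | cons c rest ih =>
    by_cases h : c = '\n' ∨ c = '\r'
    · simp [lineScan, h]
    · push_neg at h
      simp [lineScan, h.1, h.2]
      simpa using ih

theorem lineScan_break_head : ∀ (cs : List Char) (b : Char) (r : List Char),
    (lineScan cs).2 = b :: r → b = '\n' ∨ b = '\r' := by
  intro cs
  induction cs with
  | nil => simp [lineScan]
  | cons c rest ih =>
    intro b r hbr
    by_cases h : c = '\n' ∨ c = '\r'
    · simp [lineScan, h] at hbr
      exact hbr.1 ▸ h
    · simp [lineScan, h] at hbr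
      exact ih b r hbr

theorem slkGo_eq (cs cur : List Char) :
    slkGo cs cur =
      (match lineScan cs with
       | (content, []) => if (cur ++ content).isEmpty then [] else [cur ++ content]
       | (content, b :: r) =>
         if b = '\r' ∧ r.head? = some '\n' then
           (cur ++ content ++ ['\r', '\n']) :: slkGo r.tail []
         else (cur ++ content ++ [b]) :: slkGo r []) := by
  induction cs generalizing cur with
  | nil => simp [slkGo, lineScan]
  | cons c rest ih =>
    by_cases hc : c = '\r'
    · subst hc
      cases rest with
      | nil => simp [slkGo, lineScan]
      | cons r0 r =>
        by_cases hr0 : r0 = '\n'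
        · subst hr0; simp [slkGo, lineScan]
        · simp [slkGo, lineScan, hr0]
    · by_cases hn : c = '\n'
      · subst hn
        simp only [lineScan]
        norm_num
        conv_lhs => rw [slkGo.eq_def]
        simp
      · have hnb : ¬(c = '\n' ∨ c = '\r') := by tauto
        rcases hLS : lineScan rest with ⟨a, b2⟩
        have : slkGo (c :: rest) cur = slkGo rest (cur ++ [c]) := by
          conv_lhs => rw [slkGo.eq_def]
          simp [hc, hn]
        have hcr : lineScan (c :: rest) = (c :: a, b2) := by
          simp [lineScan, hnb, hLS]
        rw [this, ih, hLS, hcr]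
        cases b2 <;> simp

theorem aStep_acc (k : Bool) (prev : Option (List Char)) (acc : List String) (line : List Char) :
    aStep k (prev, acc) line = ((aStep k (prev, []) line).1, acc ++ (aStep k (prev, []) line).2) := by
  unfold aStep
  split_ifs <;> cases prev <;> simp

theorem foldl_aStep_acc (k : Bool) (ls : List (List Char)) :
    ∀ (prev : Option (List Char)) (acc : List String),
      List.foldl (aStep k) (prev, acc) ls =
        ((List.foldl (aStep k) (prev, []) ls).1,
          acc ++ (List.foldl (aStep k) (prev, []) ls).2) := by
  induction ls with
  | nil => simp
  | cons line ls ih =>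
    intro prev acc
    simp only [List.foldl_cons]
    rw [aStep_acc k prev acc line]
    rcases h : aStep k (prev, []) line with ⟨p2, d⟩
    rw [ih p2 (acc ++ d), ih p2 d]
    simp

theorem pvFinish_cons (P : Option (List Char)) (x : String) (out : List String) :
    pvFinish (P, [x] ++ out) = x :: pvFinish (P, out) := by
  cases P <;> simp [pvFinish]

theorem main_lemma : ∀ (n : Nat) (cs : List Char) (k : Bool), cs.length ≤ n →
    pvFinish (List.foldl (aStep k) (none, []) (slkGo cs [])) = altGo k cs := by
  intro n
  induction n with
  | zero =>
    intro cs k hlen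
    have : cs = [] := by cases cs <;> simp_all
    subst this
    simp [slkGo, pvFinish, altGo, lineScan]
  | succ n ih =>
    intro cs k hlen
    rcases hLS : lineScan cs with ⟨content, brk⟩
    have happ : content ++ brk = cs := by
      have h := lineScan_append cs
      rw [hLS] at h
      simpa using h
    have hnb : ∀ c ∈ content, ¬(c = '\n' ∨ c = '\r') := by
      have h := lineScan_no_break cs
      rw [hLS] at h
      simpa using h
    cases brk with
    | nil =>
      have hcs : content = cs := by simpa using happ
      subst hcs
      rw [slkGo_eq, hLS]
      conv_rhs => rw [altGo.eq_def, hLS]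
      by_cases hE : content = []
      · subst hE
        simp [pvFinish]
      · have h1 : PySem.Chars.endswith content ['\r', '\n'] = false := by
          rw [Bool.eq_false_iff, Ne, PySem.Chars.endswith_iff]
          exact fun hs => hnb '\n' (hs.subset (by simp)) (Or.inl rfl)
        have h2 : PySem.Chars.endswith content ['\n'] = false := by
          rw [Bool.eq_false_iff, Ne, PySem.Chars.endswith_iff]
          exact fun hs => hnb '\n' (hs.subset (by simp)) (Or.inl rfl)
        have h3 : PySem.Chars.endswith content ['\r'] = false := by
          rw [Bool.eq_false_iff, Ne, PySem.Chars.endswith_iff]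
          exact fun hs => hnb '\r' (hs.subset (by simp)) (Or.inr rfl)
        simp [hE, aStep, h1, h2, h3, pvFinish]
    | cons b r =>
      have hb : b = '\n' ∨ b = '\r' := lineScan_break_head cs b r (by rw [hLS])
      have hlen2 : content.length + r.length + 1 = cs.length := by
        have h := congrArg List.length happ
        simpa using h
      rw [slkGo_eq, hLS]
      conv_rhs => rw [altGo.eq_def, hLS]
      by_cases hbr : b = '\r' ∧ r.head? = some '\n'
      · simp only [if_pos hbr, List.nil_append, List.foldl_cons]
        obtain ⟨hb1, _⟩ := hbr
        subst hb1
        have e1 : PySem.Chars.endswith (content ++ ['\r', '\n']) ['\r', '\n'] = true := by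
          rw [PySem.Chars.endswith_iff]
          exact List.suffix_append content ['\r', '\n']
        have hsl : PySem.List.slice (content ++ ['\r', '\n']) none (some (-2)) = content := by
          rw [PySem.List.slice_to_neg_ofNat _ 2 (by omega)]
          rw [List.length_append]
          simp [List.take_left']
        simp only [aStep, e1, if_true, hsl]
        rw [foldl_aStep_acc]
        have hr : r.tail.length ≤ n := by
          have := @List.length_tail _ r
          omega
        simp only [List.nil_append]
        rw [pvFinish_cons]
        simp only [Prod.mk.eta]
        rw [ih r.tail k hr]
        cases k <;> simp
      · simp only [if_neg hbr, List.nil_append, List.foldl_cons]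
        have e1 : PySem.Chars.endswith (content ++ [b]) ['\r', '\n'] = false := by
          rw [Bool.eq_false_iff, Ne, PySem.Chars.endswith_iff]
          rintro ⟨t, ht⟩
          have ht2 : (t ++ ['\r']) ++ ['\n'] = content ++ [b] := by
            rw [List.append_assoc]
            simpa using ht
          obtain ⟨hc, hbn⟩ := List.append_inj' ht2 (by simp)
          exact hnb '\r' (by rw [← hc]; simp) (Or.inr rfl)
        have e2 : (PySem.Chars.endswith (content ++ [b]) ['\n'] ||
            PySem.Chars.endswith (content ++ [b]) ['\r']) = true := by
          rcases hb with rfl | rfl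
          · have h : PySem.Chars.endswith (content ++ ['\n']) ['\n'] = true := by
              rw [PySem.Chars.endswith_iff]
              exact List.suffix_append content ['\n']
            simp [h]
          · have h : PySem.Chars.endswith (content ++ ['\r']) ['\r'] = true := by
              rw [PySem.Chars.endswith_iff]
              exact List.suffix_append content ['\r']
            simp [h]
        have hsl : PySem.List.slice (content ++ [b]) none (some (-1)) = content := by
          rw [PySem.List.slice_to_neg_one]
          simp
        simp only [aStep, e1, e2, if_true, Bool.false_eq_true, if_false, hsl]
        rw [foldl_aStep_acc]
        simp only [List.nil_append]
        rw [pvFinish_cons]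
        simp only [Prod.mk.eta]
        have hr2 : r.length ≤ n := by omega
        rw [ih r k hr2]
        cases k <;> simp

-- ===== VERDICT (by name: the statement is the Claim_ definition above) =====
theorem logical_lines_spec : Claim_equal_logical_lines := by
  intro text k _
  unfold Spec_logical_lines logical_lines logical_lines_alt
  exact main_lemma text.toList.length text.toList k le_rfl
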